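-- pv_equiv track=rewrite | github.com/emersion/python-emailthreads | emailreview.py | trim_empty_lines
-- ===== SOURCE A (Python) =====
-- def trim_empty_lines(block):
-- 	start = 0
-- 	for (i, l) in enumerate(block):
-- 		if l != "":
-- 			break
-- 		start = i + 1
-- 	block = block[start:]
--
-- 	end = len(block)
-- 	for (i, l) in enumerate(reversed(block)):
-- 		if l != "":
-- 			break
-- 		end = len(block) - i - 1
-- 	block = block[:end]
--
-- 	return block
-- ===== SOURCE B (Python) =====
-- def trim_empty_lines(block):
-- 	idx = [i for (i, l) in enumerate(block) if l != ""]
-- 	if not idx: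
-- 		return block[:0]
-- 	return block[idx[0]:idx[-1] + 1]
-- ===== Notes on version B (the rewrite author's own statement) =====
-- stated objective: simpler
-- what changed: Replaces the two from-each-end trimming loops (forward scan for start, reversed scan for end) with one pass that collects the indices of non-empty lines and takes a single slice from the first to the last such index.
import Mathlib
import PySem

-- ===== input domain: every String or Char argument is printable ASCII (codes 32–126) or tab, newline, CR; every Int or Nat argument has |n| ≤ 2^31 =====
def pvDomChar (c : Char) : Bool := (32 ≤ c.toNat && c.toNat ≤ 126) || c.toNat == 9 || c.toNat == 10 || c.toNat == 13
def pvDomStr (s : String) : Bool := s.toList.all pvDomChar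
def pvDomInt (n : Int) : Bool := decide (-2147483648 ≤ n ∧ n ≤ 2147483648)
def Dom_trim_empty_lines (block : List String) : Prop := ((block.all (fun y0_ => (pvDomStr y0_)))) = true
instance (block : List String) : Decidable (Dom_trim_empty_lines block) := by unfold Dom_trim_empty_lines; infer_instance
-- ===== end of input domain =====

-- B replaces A's two from-each-end trimming loops by one pass collecting the
-- indices of non-empty lines plus a single slice (objective: simpler decomposition).

-- ===== PORT A =====
-- first loop: for (i, l) in enumerate(block): if l != "": break; start = i + 1
def pvStartLoop : List (Int × String) → Int → Int
  | [], start => start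
  | (i, l) :: rest, start => if l ≠ "" then start else pvStartLoop rest (i + 1)

-- second loop: for (i, l) in enumerate(reversed(block)): if l != "": break; end = len(block) - i - 1
def pvEndLoop (n : Int) : List (Int × String) → Int → Int
  | [], e => e
  | (i, l) :: rest, e => if l ≠ "" then e else pvEndLoop n rest (n - i - 1)

def trim_empty_lines (block : List String) : List String :=
  let start := pvStartLoop (PySem.List.enumerate block) 0
  let block1 := PySem.List.slice block (some start) none
  let e := pvEndLoop (block1.length : Int) (PySem.List.enumerate block1.reverse) (block1.length : Int)
  PySem.List.slice block1 none (some e)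

-- ===== PORT B =====
-- idx = [i for (i, l) in enumerate(block) if l != ""]
def trim_empty_lines_alt (block : List String) : List String :=
  let idx := ((PySem.List.enumerate block).filter (fun p => decide (p.2 ≠ ""))).map Prod.fst
  match h : idx with
  | [] => PySem.List.slice block none (some 0)
  | i :: rest => PySem.List.slice block (some i) (some ((i :: rest).getLast (by simp) + 1))

-- ===== PRECONDITION & SPEC =====
def Spec_trim_empty_lines (block : List String) (out : List String) : Prop := out = trim_empty_lines_alt block
instance (block : List String) (out : List String) : Decidable (Spec_trim_empty_lines block out) := by unfold Spec_trim_empty_lines; infer_instance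

-- ===== CLAIM (what is proved, stated in full; the proofs are below) =====
def Claim_equal_trim_empty_lines : Prop := ∀ (block : List String), Dom_trim_empty_lines block → Spec_trim_empty_lines block (trim_empty_lines block)

-- ===== LEMMAS AND PROOFS =====

-- the empty-line test used by both programs, as a Bool predicate
def pvEmp (s : String) : Bool := s == ""

lemma pvStartLoop_spec (l : List String) (k : Int) :
    pvStartLoop (PySem.List.enumerate l k) k = k + ((l.takeWhile pvEmp).length : Int) := by
  induction l generalizing k with
  | nil => simp [PySem.List.enumerate_nil, pvStartLoop]
  | cons h t ih =>
    rw [PySem.List.enumerate_cons]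
    by_cases hh : h = ""
    · subst hh
      simp [pvStartLoop, pvEmp, ih]
      omega
    · simp [pvStartLoop, hh, pvEmp]

lemma pvEndLoop_spec (l : List String) (k n : Int) :
    pvEndLoop n (PySem.List.enumerate l k) (n - k) = n - k - ((l.takeWhile pvEmp).length : Int) := by
  induction l generalizing k with
  | nil => simp [PySem.List.enumerate_nil, pvEndLoop]
  | cons h t ih =>
    rw [PySem.List.enumerate_cons]
    by_cases hh : h = ""
    · subst hh
      have : n - k - 1 = n - (k + 1) := by ring
      simp [pvEndLoop, pvEmp, this, ih]
      omega
    · simp [pvEndLoop, hh, pvEmp]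

lemma takeWhile_len_le {α : Type} (p : α → Bool) (l : List α) : (l.takeWhile p).length ≤ l.length :=
  (List.takeWhile_prefix p).length_le

-- A's value in closed form: drop the leading empties, then take up to the last non-empty
lemma trim_empty_lines_eq (block : List String) :
    trim_empty_lines block =
      (block.dropWhile pvEmp).take
        ((block.dropWhile pvEmp).length - ((block.dropWhile pvEmp).reverse.takeWhile pvEmp).length) := by
  simp only [trim_empty_lines]
  have h1 : pvStartLoop (PySem.List.enumerate block) 0
      = ((block.takeWhile pvEmp).length : Int) := by
    simpa using pvStartLoop_spec block 0
  rw [h1, PySem.List.slice_from_natCast]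
  have hd : block.drop (block.takeWhile pvEmp).length = block.dropWhile pvEmp := by
    nth_rewrite 2 [← List.takeWhile_append_dropWhile (p := pvEmp) (l := block)]
    rw [List.drop_left]
  rw [hd]
  set d := block.dropWhile pvEmp with hdd
  have h2 : pvEndLoop (d.length : Int) (PySem.List.enumerate d.reverse) (d.length : Int)
      = (d.length : Int) - ((d.reverse.takeWhile pvEmp).length : Int) := by
    have := pvEndLoop_spec d.reverse 0 (d.length : Int)
    simpa using this
  rw [h2]
  have hle : (d.reverse.takeWhile pvEmp).length ≤ d.length := by
    have := takeWhile_len_le pvEmp d.reverse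
    simpa using this
  rw [PySem.List.slice_to _ (by omega)]
  congr 1
  omega

-- the index list B builds, with a free enumeration start
def pvIdx (k : Int) (l : List String) : List Int :=
  ((PySem.List.enumerate l k).filter (fun p => decide (p.2 ≠ ""))).map Prod.fst

lemma pvIdx_eq_nil_iff (k : Int) (l : List String) :
    pvIdx k l = [] ↔ ∀ x ∈ l, x = "" := by
  induction l generalizing k with
  | nil => simp [pvIdx, PySem.List.enumerate_nil]
  | cons h t ih =>
    by_cases hh : h = ""
    · simp [pvIdx, PySem.List.enumerate_cons, hh] at ih ⊢
      exact ih (k + 1)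
    · simp [pvIdx, PySem.List.enumerate_cons, hh]

lemma pvIdx_head? (k : Int) (l : List String) (hne : pvIdx k l ≠ []) :
    (pvIdx k l).head? = some (k + ((l.takeWhile pvEmp).length : Int)) := by
  induction l generalizing k with
  | nil => simp [pvIdx, PySem.List.enumerate_nil] at hne
  | cons h t ih =>
    by_cases hh : h = ""
    · have he : pvIdx k (h :: t) = pvIdx (k + 1) t := by
        simp [pvIdx, PySem.List.enumerate_cons, hh]
      rw [he] at hne ⊢
      rw [ih (k + 1) hne]
      simp [pvEmp, hh]
      omega
    · simp [pvIdx, PySem.List.enumerate_cons, hh, pvEmp]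

lemma pvIdx_getLast? (k : Int) (l : List String) (hne : pvIdx k l ≠ []) :
    (pvIdx k l).getLast? =
      some (k + (l.length : Int) - 1 - ((l.reverse.takeWhile pvEmp).length : Int)) := by
  induction l using List.reverseRecOn generalizing k with
  | nil => simp [pvIdx, PySem.List.enumerate_nil] at hne
  | append_singleton t a ih =>
    have hsplit : pvIdx k (t ++ [a]) = pvIdx k t ++ pvIdx (k + (t.length : Int)) [a] := by
      simp [pvIdx, PySem.List.enumerate_append, List.filter_append]
    by_cases hh : a = ""
    · have ha : pvIdx (k + (t.length : Int)) [a] = [] := by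
        simp [pvIdx, PySem.List.enumerate_cons, PySem.List.enumerate_nil, hh]
      rw [hsplit, ha, List.append_nil] at hne ⊢
      rw [ih k hne]
      subst hh
      simp [pvEmp]
      omega
    · have ha : pvIdx (k + (t.length : Int)) [a] = [k + (t.length : Int)] := by
        simp [pvIdx, PySem.List.enumerate_cons, PySem.List.enumerate_nil, hh]
      rw [hsplit, ha, List.getLast?_concat]
      simp [pvEmp, hh]
      omega

lemma dropWhile_head_false (l : List String) (h : l.dropWhile pvEmp ≠ []) :
    pvEmp ((l.dropWhile pvEmp).head h) = false :=
  List.head_dropWhile_not pvEmp h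

-- trailing-empty run of block equals that of block with its leading empties removed
lemma takeWhile_reverse_dropWhile (block : List String) (h : block.dropWhile pvEmp ≠ []) :
    ((block.dropWhile pvEmp).reverse.takeWhile pvEmp).length
      = (block.reverse.takeWhile pvEmp).length := by
  set d := block.dropWhile pvEmp with hd
  have hsplit : block.reverse = d.reverse ++ (block.takeWhile pvEmp).reverse := by
    conv_lhs => rw [← List.takeWhile_append_dropWhile (p := pvEmp) (l := block)]
    rw [List.reverse_append]
  rw [hsplit, List.takeWhile_append]
  have hne : (d.reverse.takeWhile pvEmp).length ≠ d.reverse.length := by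
    intro hlen
    have heq : d.reverse.takeWhile pvEmp = d.reverse :=
      (List.takeWhile_prefix pvEmp).eq_of_length hlen
    have hall : ∀ x ∈ d.reverse, pvEmp x := by
      intro x hx
      have := List.takeWhile_eq_self_iff.mp heq
      exact this x hx
    have hhead : pvEmp (d.head h) = true := by
      exact hall _ ((List.mem_reverse).mpr (List.head_mem h))
    rw [dropWhile_head_false block h] at hhead
    exact Bool.false_ne_true hhead
  rw [if_neg hne]

-- B's value in the same closed form
lemma trim_empty_lines_alt_eq (block : List String) :
    trim_empty_lines_alt block =
      (block.dropWhile pvEmp).take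
        ((block.dropWhile pvEmp).length - ((block.dropWhile pvEmp).reverse.takeWhile pvEmp).length) := by
  simp only [trim_empty_lines_alt]
  split
  next heq =>
    have hnil : pvIdx 0 block = [] := heq
    have hall : ∀ x ∈ block, x = "" := (pvIdx_eq_nil_iff 0 block).mp hnil
    have hdnil : block.dropWhile pvEmp = [] := by
      rw [List.dropWhile_eq_nil_iff]
      intro x hx; simp [pvEmp, hall x hx]
    rw [PySem.List.slice_to _ (by norm_num), hdnil]
    simp
  next i rest heq =>
    have hcons : pvIdx 0 block = i :: rest := heq
    have hne : pvIdx 0 block ≠ [] := by simp [hcons]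
    have hall : ¬ ∀ x ∈ block, x = "" := by
      intro hall
      exact hne ((pvIdx_eq_nil_iff 0 block).mpr hall)
    set s := (block.takeWhile pvEmp).length with hs
    set t := (block.reverse.takeWhile pvEmp).length with ht
    have hhead : i = (s : Int) := by
      have h := pvIdx_head? 0 block hne
      rw [hcons] at h
      simp at h
      omega
    have hlast : (i :: rest).getLast (by simp)
        = (block.length : Int) - 1 - (t : Int) := by
      have h := pvIdx_getLast? 0 block hne
      rw [hcons, List.getLast?_eq_some_getLast (by simp)] at h
      simp only [Option.some_inj] at h
      rw [h]
      ring
    have hdne : block.dropWhile pvEmp ≠ [] := by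
      intro hnil
      apply hall
      intro x hx
      have := List.dropWhile_eq_nil_iff.mp hnil x hx
      simpa [pvEmp] using this
    have ht_lt : t < block.length := by
      have hle : t ≤ block.length := by
        have := takeWhile_len_le pvEmp block.reverse
        simpa [ht] using this
      rcases Nat.lt_or_ge t block.length with h | h
      · exact h
      · exfalso
        have hlen : t = block.reverse.length := by simp [ht]; omega
        have heq2 : block.reverse.takeWhile pvEmp = block.reverse :=
          (List.takeWhile_prefix pvEmp).eq_of_length (by simpa [ht] using hlen)
        apply hall
        intro x hx
        have := List.takeWhile_eq_self_iff.mp heq2 x (by simpa [List.mem_reverse] using hx)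
        simpa [pvEmp] using this
    have harith : (i :: rest).getLast (by simp) + 1 = ((block.length - t : Nat) : Int) := by
      rw [hlast]; omega
    rw [harith, hhead, PySem.List.slice_natCast]
    have hd : block.drop s = block.dropWhile pvEmp := by
      rw [hs]
      nth_rewrite 2 [← List.takeWhile_append_dropWhile (p := pvEmp) (l := block)]
      rw [List.drop_left]
    rw [hd, takeWhile_reverse_dropWhile block hdne, ← ht]
    congr 1
    have hlen : block.length = s + (block.dropWhile pvEmp).length := by
      have h2 := congrArg List.length (List.takeWhile_append_dropWhile (p := pvEmp) (l := block))
      rw [List.length_append] at h2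
      omega
    omega

-- ===== VERDICT (by name: the statement is the Claim_ definition above) =====
theorem trim_empty_lines_spec : Claim_equal_trim_empty_lines := by
  intro block _
  unfold Spec_trim_empty_lines
  rw [trim_empty_lines_eq, trim_empty_lines_alt_eq]
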